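-- pv_equiv track=rewrite | github.com/lilleswing/adventcode | 2023/day02.py | get_min_set
-- ===== SOURCE A (Python) =====
-- def get_min_set(game):
--     d = {}
--     for my_round in game:
--         for k, v in my_round.items():
--             if k not in d:
--                 d[k] = 0
--             d[k] = max(d[k], v)
--     return d
-- ===== SOURCE B (Python) =====
-- def get_min_set(game):
--     grouped = {}
--     for my_round in game:
--         for k, v in my_round.items():
--             grouped.setdefault(k, []).append(v)
--     return {k: max([0] + vals) for k, vals in grouped.items()}
-- ===== Notes on version B (the rewrite author's own statement) =====
-- stated objective: alternative
-- what changed: Replaces A's single streaming max-update of a result dict by a two-pass group-by: first collect every key's values into lists, then reduce each list with max([0]+vals).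
import Mathlib
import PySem

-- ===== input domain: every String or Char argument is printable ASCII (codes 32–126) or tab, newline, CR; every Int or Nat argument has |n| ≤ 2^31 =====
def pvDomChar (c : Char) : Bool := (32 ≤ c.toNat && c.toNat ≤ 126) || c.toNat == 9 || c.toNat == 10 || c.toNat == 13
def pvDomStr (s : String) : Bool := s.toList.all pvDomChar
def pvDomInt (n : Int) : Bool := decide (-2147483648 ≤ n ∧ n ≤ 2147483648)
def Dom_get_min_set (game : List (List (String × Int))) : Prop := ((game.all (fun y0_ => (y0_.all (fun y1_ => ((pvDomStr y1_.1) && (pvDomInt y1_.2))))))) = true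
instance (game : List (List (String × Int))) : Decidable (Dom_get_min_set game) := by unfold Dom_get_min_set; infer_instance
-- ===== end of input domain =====

-- B replaces A's streaming max-update with a two-pass group-by-key + per-key max([0]+vals) reduce (alternative decomposition, same cost).

-- ===== PORT A =====
-- one iteration of A's inner loop body: 'if k not in d: d[k] = 0; d[k] = max(d[k], v)'
def pvStepA (d : PySem.Dict String Int) (p : String × Int) : PySem.Dict String Int :=
  let d1 := if d.contains p.1 then d else d.insert p.1 0
  d1.insert p.1 (max (d1.getD p.1 0) p.2)

def get_min_set (game : List (List (String × Int))) : List (String × Int) :=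
  (game.foldl (fun d my_round => my_round.foldl pvStepA d) PySem.Dict.empty).items

-- ===== PORT B =====
-- one iteration of B's grouping loop body: 'grouped.setdefault(k, []).append(v)'
def pvGroupB (g : PySem.Dict String (List Int)) (p : String × Int) : PySem.Dict String (List Int) :=
  g.modify p.1 [] (· ++ [p.2])

-- {k: max([0] + vals) for k, vals in grouped.items()}; max([0]+vals) on Ints is foldl max 0 vals
def get_min_set_alt (game : List (List (String × Int))) : List (String × Int) :=
  (game.foldl (fun g my_round => my_round.foldl pvGroupB g) PySem.Dict.empty).items.map
    (fun kv => (kv.1, kv.2.foldl max 0))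

-- ===== PRECONDITION & SPEC =====
def Spec_get_min_set (game : List (List (String × Int))) (out : List (String × Int)) : Prop := out = get_min_set_alt game
instance (game : List (List (String × Int))) (out : List (String × Int)) : Decidable (Spec_get_min_set game out) := by unfold Spec_get_min_set; infer_instance

-- ===== CLAIM (what is proved, stated in full; the proofs are below) =====
def Claim_equal_get_min_set : Prop := ∀ (game : List (List (String × Int))), Dom_get_min_set game → Spec_get_min_set game (get_min_set game)

-- ===== LEMMAS AND PROOFS =====

-- A's step updates the lookup at k to max(old, v) when k = p.1 and leaves it alone otherwise
theorem pv_stepA_getD (d : PySem.Dict String Int) (p : String × Int) (k : String) :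
    (pvStepA d p).getD k 0 = if k = p.1 then max (d.getD k 0) p.2 else d.getD k 0 := by
  unfold pvStepA
  by_cases hc : d.contains p.1 <;> by_cases hk : k = p.1
  · subst hk; simp [hc]
  · simp [hc, hk, PySem.Dict.getD_insert]
  · subst hk
    have h0 : d.getD p.1 0 = 0 := PySem.Dict.getD_of_not_contains d 0 (by simpa using hc)
    simp [hc, h0]
  · simp [hc, hk, PySem.Dict.getD_insert]

-- value invariant for A's loop: the entry at k is the running max (seeded 0) of k's values
theorem pv_foldA_getD (l : List (String × Int)) (d : PySem.Dict String Int) (k : String) :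
    (l.foldl pvStepA d).getD k 0
      = ((l.filter (fun p => p.1 == k)).map (·.2)).foldl max (d.getD k 0) := by
  induction l generalizing d with
  | nil => rfl
  | cons p l ih =>
      simp only [List.foldl_cons, ih, List.filter_cons]
      by_cases hk : p.1 = k
      · simp [pv_stepA_getD, hk]
      · simp [pv_stepA_getD, hk, Ne.symm hk]

-- A's result dict and B's grouped dict list the same keys in the same order
theorem pv_keys_agree (l : List (String × Int)) (d : PySem.Dict String Int)
    (g : PySem.Dict String (List Int)) (hdg : d.keys = g.keys) :
    (l.foldl pvStepA d).keys = (l.foldl pvGroupB g).keys := by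
  induction l generalizing d g with
  | nil => exact hdg
  | cons p l ih =>
      simp only [List.foldl_cons]
      refine ih _ _ ?_
      have hcc : d.contains p.1 = g.contains p.1 := by
        rw [PySem.Dict.contains_eq_decide_mem_keys, PySem.Dict.contains_eq_decide_mem_keys, hdg]
      rw [show pvGroupB g p = g.modify p.1 [] (· ++ [p.2]) from rfl, PySem.Dict.keys_modify]
      unfold pvStepA
      by_cases hc : d.contains p.1
      · rw [if_pos hc, PySem.Dict.keys_insert_of_contains d _ hc,
            PySem.Dict.keys_insert_of_contains g _ (hcc ▸ hc)]
        exact hdg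
      · have hc' : d.contains p.1 = false := by simpa using hc
        rw [if_neg hc, PySem.Dict.insert_insert_self,
            PySem.Dict.keys_insert_of_not_contains d _ hc',
            PySem.Dict.keys_insert_of_not_contains g _ (hcc ▸ hc'), hdg]

-- ===== VERDICT (by name: the statement is the Claim_ definition above) =====
theorem get_min_set_spec : Claim_equal_get_min_set := by
  intro game _
  unfold Spec_get_min_set get_min_set get_min_set_alt
  rw [← List.foldl_flatten (f := pvStepA), ← List.foldl_flatten (f := pvGroupB)]
  have hkeys := pv_keys_agree game.flatten PySem.Dict.empty PySem.Dict.empty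
    (by rw [PySem.Dict.keys_empty, PySem.Dict.keys_empty])
  have hndB : (game.flatten.foldl pvGroupB PySem.Dict.empty).keys.Nodup :=
    PySem.Dict.nodup_keys_foldl_modify_key game.flatten Prod.fst []
      (fun _ x => (· ++ [x.2])) PySem.Dict.empty PySem.Dict.nodup_keys_empty
  have hndA : (game.flatten.foldl pvStepA PySem.Dict.empty).keys.Nodup := hkeys ▸ hndB
  rw [PySem.Dict.items_eq_map_keys _ hndA 0, PySem.Dict.items_eq_map_keys _ hndB [],
      List.map_map, hkeys]
  refine List.map_congr_left (fun k hk => ?_)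
  simp only [Function.comp_apply]
  have hB : (game.flatten.foldl pvGroupB PySem.Dict.empty).getD k []
      = (game.flatten.filter (fun p => p.1 == k)).map (·.2) := by
    have h := PySem.Dict.getD_foldl_modify_append game.flatten PySem.Dict.empty k
    simpa [pvGroupB, PySem.Dict.getD_empty] using h
  rw [pv_foldA_getD, hB, PySem.Dict.getD_empty]
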